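-- pv_equiv track=rewrite | github.com/Project-OSmOSE/OSEkit | src/OSmOSE/timestamps.py | convert_template_to_re
-- ===== SOURCE A (Python) =====
-- __converter = {
--     "%Y": r"[12][0-9]{3}",
--     "%y": r"[0-9]{2}",
--     "%m": r"(0[1-9]|1[0-2])",
--     "%d": r"([0-2][0-9]|3[0-1])",
--     "%H": r"([0-1][0-9]|2[0-4])",
--     "%I": r"(0[1-9]|1[0-2])",
--     "%p": r"(AM|PM)",
--     "%M": r"[0-5][0-9]",
--     "%S": r"[0-5][0-9]",
--     "%f": r"[0-9]{6}",
-- }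
--
-- def convert_template_to_re(date_template: str) -> str:
--     """Converts a template in strftime format to a matching regular expression
--
--     Parameter:
--         date_template: the template in strftime format
--
--     Returns:
--         The regular expression matching the template"""
--
--     res = ""
--     i = 0
--     while i < len(date_template):
--         if date_template[i : i + 2] in __converter:
--             res += __converter[date_template[i : i + 2]]
--             i += 1
--         else:
--             res += date_template[i]
--         i += 1
--
--     return res
-- ===== SOURCE B (Python) =====
-- _CODES = {
--     "Y": r"[12][0-9]{3}",
--     "y": r"[0-9]{2}",
--     "m": r"(0[1-9]|1[0-2])",
--     "d": r"([0-2][0-9]|3[0-1])",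
--     "H": r"([0-1][0-9]|2[0-4])",
--     "I": r"(0[1-9]|1[0-2])",
--     "p": r"(AM|PM)",
--     "M": r"[0-5][0-9]",
--     "S": r"[0-5][0-9]",
--     "f": r"[0-9]{6}",
-- }
--
-- def convert_template_to_re(date_template: str) -> str:
--     """One-pass state machine: 'pending' records an unresolved '%'."""
--     out = []
--     pending = False
--     for ch in date_template:
--         if pending:
--             pending = False
--             repl = _CODES.get(ch)
--             if repl is not None:
--                 out.append(repl)
--             elif ch == "%":
--                 out.append("%")
--                 pending = True
--             else:
--                 out.append("%")
--                 out.append(ch)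
--         elif ch == "%":
--             pending = True
--         else:
--             out.append(ch)
--     if pending:
--         out.append("%")
--     return "".join(out)
-- ===== Notes on version B (the rewrite author's own statement) =====
-- stated objective: faster
-- what changed: Replaced the index-advancing while-loop that slices two characters, tests membership in a two-char-keyed dict and grows the result by string concatenation with a single left-to-right state-machine pass (a 'pending %' flag and a dict keyed by the single code character) that collects pieces in a list and joins once.
import Mathlib
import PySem

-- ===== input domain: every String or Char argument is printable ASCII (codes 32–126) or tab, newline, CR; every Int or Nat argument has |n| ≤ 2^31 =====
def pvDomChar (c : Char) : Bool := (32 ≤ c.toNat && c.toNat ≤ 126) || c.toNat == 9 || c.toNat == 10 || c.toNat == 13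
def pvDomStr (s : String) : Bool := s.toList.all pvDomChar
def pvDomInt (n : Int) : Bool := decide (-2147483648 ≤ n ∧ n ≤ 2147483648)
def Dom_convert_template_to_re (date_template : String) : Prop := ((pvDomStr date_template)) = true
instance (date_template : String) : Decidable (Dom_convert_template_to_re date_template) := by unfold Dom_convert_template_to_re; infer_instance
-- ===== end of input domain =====

-- B replaces A's index-advancing while-loop (two-char slice + membership in a two-char-keyed dict)
-- with a one-pass state machine over the characters (a 'pending %' flag, dict keyed by the code char).

-- ===== PORT A =====
-- __converter : dict with two-character string keys, in insertion order
def pvConvA : PySem.Dict (List Char) (List Char) := PySem.Dict.mk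
  [ ("%Y".toList, "[12][0-9]{3}".toList)
  , ("%y".toList, "[0-9]{2}".toList)
  , ("%m".toList, "(0[1-9]|1[0-2])".toList)
  , ("%d".toList, "([0-2][0-9]|3[0-1])".toList)
  , ("%H".toList, "([0-1][0-9]|2[0-4])".toList)
  , ("%I".toList, "(0[1-9]|1[0-2])".toList)
  , ("%p".toList, "(AM|PM)".toList)
  , ("%M".toList, "[0-5][0-9]".toList)
  , ("%S".toList, "[0-5][0-9]".toList)
  , ("%f".toList, "[0-9]{6}".toList) ]

-- the while-loop of A: res accumulates, i advances by 2 on a dict hit, else by 1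
def pvLoopA (cs : List Char) (res : List Char) (i : Nat) : List Char :=
  if h : i < cs.length then
    match PySem.Dict.get? pvConvA (PySem.List.slice cs (some (i : Int)) (some ((i : Int) + 2))) with
    | some v => pvLoopA cs (res ++ v) (i + 2)
    | none   => pvLoopA cs (res ++ [cs[i]]) (i + 1)
  else res
termination_by cs.length - i

def convert_template_to_re (date_template : String) : String :=
  String.ofList (pvLoopA date_template.toList [] 0)

-- ===== PORT B =====
-- _CODES : dict keyed by the single code character
def pvCodesB : PySem.Dict Char (List Char) := PySem.Dict.mk
  [ ('Y', "[12][0-9]{3}".toList)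
  , ('y', "[0-9]{2}".toList)
  , ('m', "(0[1-9]|1[0-2])".toList)
  , ('d', "([0-2][0-9]|3[0-1])".toList)
  , ('H', "([0-1][0-9]|2[0-4])".toList)
  , ('I', "(0[1-9]|1[0-2])".toList)
  , ('p', "(AM|PM)".toList)
  , ('M', "[0-5][0-9]".toList)
  , ('S', "[0-5][0-9]".toList)
  , ('f', "[0-9]{6}".toList) ]

-- one step of B's state machine: state = (output pieces so far, pending '%' flag)
def pvStepB (st : List Char × Bool) (ch : Char) : List Char × Bool :=
  if st.2 then
    match PySem.Dict.get? pvCodesB ch with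
    | some repl => (st.1 ++ repl, false)
    | none =>
      if ch = '%' then (st.1 ++ ['%'], true)
      else (st.1 ++ ['%'] ++ [ch], false)
  else if ch = '%' then (st.1, true)
  else (st.1 ++ [ch], false)

def convert_template_to_re_alt (date_template : String) : String :=
  let st := date_template.toList.foldl pvStepB ([], false)
  String.ofList (if st.2 then st.1 ++ ['%'] else st.1)

-- ===== PRECONDITION & SPEC =====
def Spec_convert_template_to_re (date_template : String) (out : String) : Prop := out = convert_template_to_re_alt date_template
instance (date_template : String) (out : String) : Decidable (Spec_convert_template_to_re date_template out) := by unfold Spec_convert_template_to_re; infer_instance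

-- ===== CLAIM (what is proved, stated in full; the proofs are below) =====
def Claim_equal_convert_template_to_re : Prop := ∀ (date_template : String), Dom_convert_template_to_re date_template → Spec_convert_template_to_re date_template (convert_template_to_re date_template)

-- ===== LEMMAS AND PROOFS =====

-- reference recursion both ports are reduced to (proof-side helper)
def pvR : List Char → List Char
  | [] => []
  | c :: rest =>
    if c = '%' then
      match rest with
      | [] => ['%']
      | c2 :: rest2 =>
        match PySem.Dict.get? pvCodesB c2 with
        | some v => v ++ pvR rest2
        | none => '%' :: pvR (c2 :: rest2)
    else c :: pvR rest

-- A's dict keyed on a two-char slice agrees with B's dict keyed on the code char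
lemma pvGet?_nil {κ ν : Type} [BEq κ] (x : κ) :
    (PySem.Dict.mk ([] : List (κ × ν))).get? x = none := by
  simp [PySem.Dict.get?]

lemma pvConv_pair (a b : Char) :
    PySem.Dict.get? pvConvA [a, b] = if a = '%' then PySem.Dict.get? pvCodesB b else none := by
  by_cases ha : a = '%'
  · subst ha
    simp [pvConvA, pvCodesB, PySem.Dict.get?_mk_cons, pvGet?_nil]
  · have ha' : ¬ ('%' = a) := fun h => ha h.symm
    simp [pvConvA, pvCodesB, PySem.Dict.get?_mk_cons, pvGet?_nil, ha']
    exact fun h => absurd h ha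

lemma pvConv_single (a : Char) : PySem.Dict.get? pvConvA [a] = none := by
  simp [pvConvA, PySem.Dict.get?_mk_cons, pvGet?_nil]

lemma pvLoopA_eq (cs : List Char) (i : Nat) (res : List Char) :
    pvLoopA cs res i = res ++ pvR (cs.drop i) := by
  induction hn : cs.length - i using Nat.strong_induction_on generalizing i res with
  | _ n ih =>
    by_cases h : i < cs.length
    · have hdrop : cs.drop i = cs[i] :: cs.drop (i + 1) := List.drop_eq_getElem_cons h
      have hslice : PySem.List.slice cs (some (i : Int)) (some ((i : Int) + 2))
          = (cs.drop i).take 2 := by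
        have := PySem.List.slice_natCast_add (xs := cs) (j := i) (n := 2)
        simpa using this
      rw [pvLoopA, dif_pos h, hslice, hdrop]
      rcases hrest : cs.drop (i + 1) with _ | ⟨c2, rest2⟩
      · -- last character: the slice is one char long, never a dict key
        show (match PySem.Dict.get? pvConvA (List.take 2 [cs[i]]) with
              | some v => pvLoopA cs (res ++ v) (i + 2)
              | none   => pvLoopA cs (res ++ [cs[i]]) (i + 1)) = _
        rw [show List.take 2 [cs[i]] = [cs[i]] from rfl, pvConv_single]
        show pvLoopA cs (res ++ [cs[i]]) (i + 1) = _
        rw [ih (cs.length - (i + 1)) (by omega) (i + 1) _ rfl, hrest]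
        by_cases hc : cs[i] = '%' <;> simp [pvR, hc]
      · show (match PySem.Dict.get? pvConvA (List.take 2 (cs[i] :: c2 :: rest2)) with
              | some v => pvLoopA cs (res ++ v) (i + 2)
              | none   => pvLoopA cs (res ++ [cs[i]]) (i + 1)) = _
        rw [show List.take 2 (cs[i] :: c2 :: rest2) = [cs[i], c2] from rfl, pvConv_pair]
        by_cases hc : cs[i] = '%'
        · rw [if_pos hc]
          rcases hget : PySem.Dict.get? pvCodesB c2 with _ | v
          · show pvLoopA cs (res ++ [cs[i]]) (i + 1) = _
            rw [ih (cs.length - (i + 1)) (by omega) (i + 1) _ rfl, hrest]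
            simp [pvR, hget, hc]
          · show pvLoopA cs (res ++ v) (i + 2) = _
            have hi2 : i + 1 < cs.length := by
              by_contra hlt
              have : cs.drop (i + 1) = [] := List.drop_eq_nil_of_le (by omega)
              simp [this] at hrest
            have hdrop2 : cs.drop (i + 2) = rest2 := by
              have h2 : cs.drop (i + 1) = cs[i+1] :: cs.drop (i + 2) := List.drop_eq_getElem_cons hi2
              rw [hrest] at h2
              exact (List.cons.injEq _ _ _ _ ▸ h2).2.symm
            rw [ih (cs.length - (i + 2)) (by omega) (i + 2) _ rfl, hdrop2]
            simp [pvR, hget, hc]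
        · rw [if_neg hc]
          show pvLoopA cs (res ++ [cs[i]]) (i + 1) = _
          rw [ih (cs.length - (i + 1)) (by omega) (i + 1) _ rfl, hrest]
          simp [pvR, hc]
    · rw [pvLoopA]
      simp [h, List.drop_eq_nil_of_le (by omega : cs.length ≤ i), pvR]

lemma pvR_cons_ne (c : Char) (rest : List Char) (hc : ¬ c = '%') :
    pvR (c :: rest) = c :: pvR rest := by
  cases rest <;> simp [pvR, hc]

def pvFinish (st : List Char × Bool) : List Char := if st.2 then st.1 ++ ['%'] else st.1

lemma pvFoldB_eq (cs : List Char) : ∀ out : List Char,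
    pvFinish (cs.foldl pvStepB (out, false)) = out ++ pvR cs ∧
    pvFinish (cs.foldl pvStepB (out, true)) = out ++ pvR ('%' :: cs) := by
  induction cs with
  | nil => intro out; simp [pvFinish, pvR]
  | cons c rest ih =>
    intro out
    refine ⟨?_, ?_⟩
    · by_cases hc : c = '%'
      · subst hc
        have h1 : pvStepB (out, false) '%' = (out, true) := by simp [pvStepB]
        rw [List.foldl_cons, h1, (ih out).2]
      · have h1 : pvStepB (out, false) c = (out ++ [c], false) := by simp [pvStepB, hc]
        rw [List.foldl_cons, h1, (ih (out ++ [c])).1, pvR_cons_ne c rest hc]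
        simp
    · rcases hget : PySem.Dict.get? pvCodesB c with _ | v
      · by_cases hc : c = '%'
        · subst hc
          have h1 : pvStepB (out, true) '%' = (out ++ ['%'], true) := by simp [pvStepB, hget]
          rw [List.foldl_cons, h1, (ih (out ++ ['%'])).2]
          simp [pvR, hget]
        · have h1 : pvStepB (out, true) c = (out ++ ['%'] ++ [c], false) := by
            simp [pvStepB, hget, hc]
          rw [List.foldl_cons, h1, (ih (out ++ ['%'] ++ [c])).1]
          simp [pvR, hget, pvR_cons_ne c rest hc]
      · have h1 : pvStepB (out, true) c = (out ++ v, false) := by simp [pvStepB, hget]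
        rw [List.foldl_cons, h1, (ih (out ++ v)).1]
        simp [pvR, hget]

-- ===== VERDICT (by name: the statement is the Claim_ definition above) =====
theorem convert_template_to_re_spec : Claim_equal_convert_template_to_re := by
  intro s _
  unfold Spec_convert_template_to_re convert_template_to_re convert_template_to_re_alt
  rw [pvLoopA_eq]
  rw [show pvR (s.toList.drop 0) = pvR s.toList from by simp]
  rw [← (pvFoldB_eq s.toList []).1]
  simp [pvFinish]
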